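-- pv_equiv track=rewrite | github.com/averma07p19/python-learning | advanced-python/NAB-Q-3.py | solution
-- ===== SOURCE A (Python) =====
-- def solution(A):
--     n = len(A)
--     if n > 200_000 or max(A) > n:
--         return -1
--     moves = 0
--
--     counts = [0] * (n + 1)
--     for num in A:
--         if counts[num] == 0:
--             counts[num] = 1
--         else:
--             distance = 0
--
--             while num - distance > 0 and counts[num - distance] > 0:
--                 distance += 1
--
--             if num - distance > 0:
--                 counts[num - distance] = 1
--                 moves += distance
--             else:
--
--                 i = num + 1
--                 while counts[i] > 0:
--                     i += 1
--                 counts[i] = 1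
--                 moves += i - num
--     return moves
-- ===== SOURCE B (Python) =====
-- def solution(A):
--     n = len(A)
--     if n > 200_000 or max(A) > n:
--         return -1
--     moves = 0
--     free = list(range(n + 1))  # sorted list of currently free slots
--
--     def count_le(lst, x):
--         # number of elements of the sorted list lst that are <= x (binary search)
--         lo, hi = 0, len(lst)
--         while lo < hi:
--             mid = (lo + hi) // 2
--             if lst[mid] <= x:
--                 lo = mid + 1
--             else:
--                 hi = mid
--         return lo
--
--     for num in A:
--         j = count_le(free, num)
--         if j > 0 and free[j - 1] == num:
--             free.pop(j - 1)              # own slot is free: take it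
--         elif j > 0 and free[j - 1] > 0:
--             moves += num - free[j - 1]   # nearest free slot below (never slot 0)
--             free.pop(j - 1)
--         else:
--             moves += free[j] - num       # nearest free slot above
--             free.pop(j)
--     return moves
-- ===== Notes on version B (the rewrite author's own statement) =====
-- stated objective: alternative
-- what changed: A scans a 0/1 occupancy array linearly down then up from each duplicate value; B instead maintains the sorted list of still-free slots and finds the slot to take (own slot / nearest free below / nearest free above) by one hand-written binary search over that list, then deletes it.
-- outside the precondition, e.g. on solution([-1, -1, 2]): A returns 1, B returns 3; on solution([-5, 1]): A raises IndexError, B returns 5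
import Mathlib
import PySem

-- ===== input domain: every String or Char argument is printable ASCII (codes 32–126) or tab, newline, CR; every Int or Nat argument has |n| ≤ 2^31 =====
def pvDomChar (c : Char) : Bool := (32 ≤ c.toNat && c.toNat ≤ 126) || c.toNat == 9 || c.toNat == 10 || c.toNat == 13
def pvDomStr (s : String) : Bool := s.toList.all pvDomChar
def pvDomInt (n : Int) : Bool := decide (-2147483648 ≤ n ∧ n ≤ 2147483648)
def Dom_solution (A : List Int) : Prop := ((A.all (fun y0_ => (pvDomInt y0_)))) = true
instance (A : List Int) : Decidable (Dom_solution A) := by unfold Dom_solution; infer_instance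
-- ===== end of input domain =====

-- B replaces A's linear down/up scans over a 0/1 occupancy array by one binary search over a
-- maintained sorted list of still-free slots (objective: alternative algorithm, same worst-case cost).

-- ===== PORT A =====
-- 'while num - distance > 0 and counts[num - distance] > 0: distance += 1'
-- fuel num.toNat + 1 is enough: the guard forces distance < num, so the fuel never runs out.
def pvDown (c : List Int) (num : Int) (d : Int) : Nat → Int
  | 0 => d
  | fuel + 1 =>
    if num - d > 0 ∧ PySem.List.pyGetD c (num - d) 0 > 0 then pvDown c num (d + 1) fuel else d

-- 'i = num + 1; while counts[i] > 0: i += 1'.  Python raises IndexError once i == len(counts);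
-- pyGetD returns 0 there instead, but under Pre_solution a free in-range slot is always reached
-- first (proved below), so the port is exact on Pre_.
def pvUp (c : List Int) (i : Int) : Nat → Int
  | 0 => i
  | fuel + 1 => if PySem.List.pyGetD c i 0 > 0 then pvUp c (i + 1) fuel else i

def pvStepA (s : List Int × Int) (num : Int) : List Int × Int :=
  let c := s.1
  let m := s.2
  if PySem.List.pyGetD c num 0 = 0 then (PySem.List.pySetD c num 1, m)
  else
    let d := pvDown c num 0 (num.toNat + 1)
    if num - d > 0 then (PySem.List.pySetD c (num - d) 1, m + d)
    else
      let i := pvUp c (num + 1) (c.length + 1)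
      (PySem.List.pySetD c i 1, m + (i - num))

def solution (A : List Int) : Int :=
  let n : Int := PySem.List.len A
  if n > 200000 then -1
  else
    -- max(A): PySem.List.max? is none exactly where Python raises ValueError (A = []),
    -- which Pre_solution excludes, so getD's default is never read on admitted inputs.
    let mx := (PySem.List.max? A (fun x => x)).getD 0
    if mx > n then -1
    else (A.foldl pvStepA (List.replicate (A.length + 1) 0, 0)).2

-- ===== PORT B =====
-- hand-written binary search of Source B: number of elements of the sorted list ≤ x.
-- fuel lst.length + 1 suffices: hi - lo shrinks by at least one per iteration.
def pvCountLE (lst : List Int) (x : Int) (lo hi : Int) : Nat → Int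
  | 0 => lo
  | fuel + 1 =>
    if lo < hi then
      let mid := PySem.Int.floordiv (lo + hi) 2
      if PySem.List.pyGetD lst mid 0 ≤ x then pvCountLE lst x (mid + 1) hi fuel
      else pvCountLE lst x lo mid fuel
    else lo

-- free.pop(j) (total form; the index is in range under Pre_, proved below)
def pvPop (l : List Int) (i : Int) : List Int := ((PySem.List.pop? l i).getD (0, l)).2

def pvStepB (s : List Int × Int) (num : Int) : List Int × Int :=
  let free := s.1
  let m := s.2
  let j := pvCountLE free num 0 (PySem.List.len free) (free.length + 1)
  if j > 0 ∧ PySem.List.pyGetD free (j - 1) 0 = num then (pvPop free (j - 1), m)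
  else if j > 0 ∧ PySem.List.pyGetD free (j - 1) 0 > 0 then
    (pvPop free (j - 1), m + (num - PySem.List.pyGetD free (j - 1) 0))
  else (pvPop free j, m + (PySem.List.pyGetD free j 0 - num))

def solution_alt (A : List Int) : Int :=
  let n : Int := PySem.List.len A
  if n > 200000 then -1
  else
    let mx := (PySem.List.max? A (fun x => x)).getD 0
    if mx > n then -1
    else (A.foldl pvStepB (PySem.List.pyRange 0 (n + 1) 1, 0)).2

-- ===== PRECONDITION & SPEC =====
-- Pre_ excludes the empty list (A raises ValueError on max([])) and lists containing a negative
-- element that still reach the counting phase (max ≤ len and len ≤ 200000): there A either raises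
-- IndexError or silently uses Python's negative-index wraparound on the counts array, an accident
-- of A's implementation that B does not reproduce.
def Pre_solution (A : List Int) : Prop :=
  A ≠ [] ∧
    (((A.length : Int) > 200000) ∨ (∃ x ∈ A, x > (A.length : Int)) ∨ (∀ x ∈ A, 0 ≤ x))
instance (A : List Int) : Decidable (Pre_solution A) := by unfold Pre_solution; infer_instance

def pvWitness_solution : List Int := [1, 2, 1]

def Spec_solution (A : List Int) (out : Int) : Prop := out = solution_alt A
instance (A : List Int) (out : Int) : Decidable (Spec_solution A out) := by
  unfold Spec_solution; infer_instance

-- ===== CLAIM (what is proved, stated in full; the proofs are below) =====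
def Claim_equal_solution : Prop :=
  ∀ (A : List Int), Dom_solution A → Pre_solution A → Spec_solution A (solution A)

-- ===== LEMMAS AND PROOFS =====

-- the sorted list of currently free slots determined by a counts array
def pvCanon (c : List Int) : List Int :=
  (PySem.List.pyRange 0 c.length 1).filter (fun s => PySem.List.pyGetD c s 0 = 0)

theorem pvCanon_mem (c : List Int) (s : Int) :
    s ∈ pvCanon c ↔ 0 ≤ s ∧ s < (c.length : Int) ∧ PySem.List.pyGetD c s 0 = 0 := by
  simp [pvCanon, PySem.List.mem_pyRange_one, and_assoc]

theorem pvCanon_sorted (c : List Int) : (pvCanon c).Pairwise (· < ·) :=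
  (PySem.List.pairwise_lt_pyRange_one 0 (c.length : Int)).filter _

theorem pvCanon_nodup (c : List Int) : (pvCanon c).Nodup :=
  (pvCanon_sorted c).imp (fun h => ne_of_lt h)

theorem pairwise_le_getElem (l : List Int) (hs : l.Pairwise (· ≤ ·)) (i j : Nat)
    (hij : i ≤ j) (hj : j < l.length) : l[i]'(lt_of_le_of_lt hij hj) ≤ l[j] := by
  rcases Nat.lt_or_eq_of_le hij with h | h
  · exact List.pairwise_iff_getElem.mp hs i j (lt_of_le_of_lt hij hj) hj h
  · subst h; exact le_refl _

theorem countP_eq_of_boundary (l : List Int) (x : Int) (k : Nat) (hk : k ≤ l.length)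
    (h1 : ∀ (i : Nat) (h : i < l.length), i < k → l[i] ≤ x)
    (h2 : ∀ (i : Nat) (h : i < l.length), k ≤ i → x < l[i]) :
    l.countP (fun y => decide (y ≤ x)) = k := by
  have e : l.countP (fun y => decide (y ≤ x)) =
      (l.take k).countP (fun y => decide (y ≤ x)) +
        (l.drop k).countP (fun y => decide (y ≤ x)) := by
    conv_lhs => rw [← List.take_append_drop k l]
    exact List.countP_append
  have e1 : (l.take k).countP (fun y => decide (y ≤ x)) = k := by
    have hall : ∀ a ∈ l.take k, (fun y => decide (y ≤ x)) a = true := by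
      intro a hmem
      obtain ⟨i, hi, rfl⟩ := List.mem_iff_getElem.mp hmem
      have hik : i < k := by rw [List.length_take] at hi; omega
      have hil : i < l.length := lt_of_lt_of_le hik hk
      rw [List.getElem_take]
      simpa using h1 i hil hik
    rw [List.countP_eq_length.mpr hall, List.length_take]; omega
  have e2 : (l.drop k).countP (fun y => decide (y ≤ x)) = 0 := by
    apply List.countP_eq_zero.mpr
    intro a hmem
    obtain ⟨i, hi, rfl⟩ := List.mem_iff_getElem.mp hmem
    rw [List.getElem_drop]
    have hil : k + i < l.length := by rw [List.length_drop] at hi; omega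
    have := h2 (k + i) hil (by omega)
    simp only [decide_eq_true_eq]
    omega
  omega

theorem sorted_boundary (x : Int) : ∀ (l : List Int), l.Pairwise (· ≤ ·) →
    ∀ (i : Nat) (h : i < l.length),
      (i < l.countP (fun y => decide (y ≤ x)) ↔ l[i] ≤ x)
  | [], _, i, h => by simp at h
  | a :: t, hs, i, h => by
    obtain ⟨ha, ht⟩ := List.pairwise_cons.mp hs
    by_cases hax : a ≤ x
    · cases i with
      | zero => simp [hax]
      | succ i =>
        have hlt' : i < t.length := by simpa using h
        have ih := sorted_boundary x t ht i hlt'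
        have hc : (a :: t).countP (fun y => decide (y ≤ x)) =
            t.countP (fun y => decide (y ≤ x)) + 1 := by
          simp [hax]
        rw [hc, List.getElem_cons_succ]
        constructor
        · intro h2; exact ih.mp (by omega)
        · intro h2; have := ih.mpr h2; omega
    · have hz : t.countP (fun y => decide (y ≤ x)) = 0 := by
        apply List.countP_eq_zero.mpr
        intro y hy
        have := ha y hy
        simp only [decide_eq_true_eq]
        omega
      cases i with
      | zero => simp [hax, hz]
      | succ i =>
        have hlt' : i < t.length := by simpa using h
        have hx2 : x < t[i] := lt_of_lt_of_le (by omega) (ha _ (List.getElem_mem hlt'))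
        have hc : (a :: t).countP (fun y => decide (y ≤ x)) = 0 := by
          simp [hax, hz]
        rw [hc, List.getElem_cons_succ]
        constructor
        · intro h2; omega
        · intro h2; omega

theorem sorted_getElem_countP_pred (l : List Int) (x : Int) (hs : l.Pairwise (· < ·))
    (s : Int) (hmem : s ∈ l) (hsx : s ≤ x) (hmax : ∀ y ∈ l, y ≤ x → y ≤ s) :
    0 < l.countP (fun y => decide (y ≤ x)) ∧
    ∀ (h : l.countP (fun y => decide (y ≤ x)) - 1 < l.length),
      l[l.countP (fun y => decide (y ≤ x)) - 1] = s := by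
  have hsle : l.Pairwise (· ≤ ·) := hs.imp (fun h => le_of_lt h)
  obtain ⟨ks, hks, rfl⟩ := List.mem_iff_getElem.mp hmem
  have hkslt : ks < l.countP (fun y => decide (y ≤ x)) :=
    (sorted_boundary x l hsle ks hks).mpr hsx
  refine ⟨by omega, ?_⟩
  intro h
  have hle : l[l.countP (fun y => decide (y ≤ x)) - 1] ≤ x :=
    (sorted_boundary x l hsle _ h).mp (by omega)
  have h1 : l[l.countP (fun y => decide (y ≤ x)) - 1] ≤ l[ks] :=
    hmax _ (List.getElem_mem h) hle
  have h2 : l[ks] ≤ l[l.countP (fun y => decide (y ≤ x)) - 1] :=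
    pairwise_le_getElem l hsle ks _ (by omega) h
  omega

theorem sorted_getElem_countP (l : List Int) (x : Int) (hs : l.Pairwise (· < ·))
    (hlt : l.countP (fun y => decide (y ≤ x)) < l.length) :
    x < l[l.countP (fun y => decide (y ≤ x))] ∧
    ∀ y ∈ l, x < y → l[l.countP (fun y => decide (y ≤ x))] ≤ y := by
  have hsle : l.Pairwise (· ≤ ·) := hs.imp (fun h => le_of_lt h)
  have h1 : x < l[l.countP (fun y => decide (y ≤ x))] := by
    by_contra hcon
    have := (sorted_boundary x l hsle _ hlt).mpr (by omega)
    omega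
  refine ⟨h1, ?_⟩
  intro y hy hxy
  obtain ⟨i, hi, rfl⟩ := List.mem_iff_getElem.mp hy
  have hni : ¬ i < l.countP (fun y => decide (y ≤ x)) := by
    intro hcon
    have := (sorted_boundary x l hsle i hi).mp hcon
    omega
  exact pairwise_le_getElem l hsle _ i (by omega) hi

theorem pvCountLE_go (lst : List Int) (x : Int) (hs : lst.Pairwise (· ≤ ·)) :
    ∀ (fuel : Nat) (lo hi : Int), 0 ≤ lo → lo ≤ hi → hi ≤ (lst.length : Int) →
      (hi - lo).toNat ≤ fuel →
      (∀ (i : Nat), (i : Int) < lo → ∀ (h : i < lst.length), lst[i] ≤ x) →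
      (∀ (i : Nat), hi ≤ (i : Int) → ∀ (h : i < lst.length), x < lst[i]) →
      pvCountLE lst x lo hi fuel = (lst.countP (fun y => decide (y ≤ x)) : Int)
  | 0, lo, hi, h0, hlh, hhl, hf, hlow, hhigh => by
    have heq : lo = hi := by omega
    subst heq
    simp only [pvCountLE]
    have : lst.countP (fun y => decide (y ≤ x)) = lo.toNat := by
      apply countP_eq_of_boundary _ _ _ (by omega)
      · intro i h hik; exact hlow i (by omega) h
      · intro i h hik; exact hhigh i (by omega) h
    omega
  | fuel + 1, lo, hi, h0, hlh, hhl, hf, hlow, hhigh => by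
    simp only [pvCountLE]
    by_cases hlt : lo < hi
    · rw [if_pos hlt]
      have hb := PySem.Int.floordiv_two_mid_bounds (le_of_lt hlt)
      have hmlt : PySem.Int.floordiv (lo + hi) 2 < hi := by
        rw [PySem.Int.floordiv_lt_iff_lt_mul (by norm_num)]; omega
      have hmn : (PySem.Int.floordiv (lo + hi) 2).toNat < lst.length := by omega
      have hget := PySem.List.pyGetD_eq_getElem lst 0
        (show (0:Int) ≤ PySem.Int.floordiv (lo + hi) 2 by omega)
        (show PySem.Int.floordiv (lo + hi) 2 < (lst.length : Int) by omega)
      rw [hget]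
      by_cases hc : lst[(PySem.Int.floordiv (lo + hi) 2).toNat] ≤ x
      · rw [if_pos hc]
        apply pvCountLE_go lst x hs fuel (PySem.Int.floordiv (lo + hi) 2 + 1) hi
          (by omega) (by omega) hhl (by omega)
        · intro i hilo h
          have hile : i ≤ (PySem.Int.floordiv (lo + hi) 2).toNat := by omega
          exact le_trans (pairwise_le_getElem lst hs i _ hile hmn) hc
        · exact hhigh
      · rw [if_neg hc]
        apply pvCountLE_go lst x hs fuel lo (PySem.Int.floordiv (lo + hi) 2)
          (by omega) (by omega) (by omega) (by omega)
        · exact hlow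
        · intro i hi2 h
          have hmi : (PySem.Int.floordiv (lo + hi) 2).toNat ≤ i := by omega
          have := pairwise_le_getElem lst hs _ i hmi h
          omega
    · rw [if_neg hlt]
      have heq : lo = hi := by omega
      subst heq
      have : lst.countP (fun y => decide (y ≤ x)) = lo.toNat := by
        apply countP_eq_of_boundary _ _ _ (by omega)
        · intro i h hik; exact hlow i (by omega) h
        · intro i h hik; exact hhigh i (by omega) h
      omega

theorem pvCountLE_spec (lst : List Int) (x : Int) (hs : lst.Pairwise (· ≤ ·)) :
    pvCountLE lst x 0 (PySem.List.len lst) (lst.length + 1) =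
      (lst.countP (fun y => decide (y ≤ x)) : Int) := by
  rw [PySem.List.len_eq]
  apply pvCountLE_go lst x hs (lst.length + 1) 0 _ le_rfl (by omega) le_rfl (by omega)
  · intro i hi h; omega
  · intro i hi h; omega

theorem pvDown_go (c : List Int) (num : Int) :
    ∀ (fuel : Nat) (d : Int), 0 ≤ d → d ≤ num → (num - d).toNat < fuel →
      (∀ t, num - d < t → t ≤ num → PySem.List.pyGetD c t 0 > 0) →
      ∃ s, pvDown c num d fuel = num - s ∧ 0 ≤ s ∧ s ≤ num - d ∧
        ¬(s > 0 ∧ PySem.List.pyGetD c s 0 > 0) ∧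
        (∀ t, s < t → t ≤ num → PySem.List.pyGetD c t 0 > 0)
  | 0, d, h0, hdn, hf, hocc => by omega
  | fuel + 1, d, h0, hdn, hf, hocc => by
    simp only [pvDown]
    by_cases hg : num - d > 0 ∧ PySem.List.pyGetD c (num - d) 0 > 0
    · rw [if_pos hg]
      obtain ⟨s, h1, h2, h3, h4, h5⟩ :=
        pvDown_go c num fuel (d + 1) (by omega) (by omega) (by omega) (by
          intro t ht1 ht2
          by_cases he : t = num - d
          · subst he; exact hg.2
          · exact hocc t (by omega) ht2)
      exact ⟨s, h1, h2, by omega, h4, h5⟩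
    · rw [if_neg hg]
      refine ⟨num - d, by omega, by omega, by omega, ?_, hocc⟩
      intro hcon
      exact hg ⟨hcon.1, hcon.2⟩

theorem pvUp_go (c : List Int) :
    ∀ (fuel : Nat) (i : Int) (t0 : Int), 0 ≤ i → i ≤ t0 →
      PySem.List.pyGetD c t0 0 = 0 →
      (∀ u, i ≤ u → u < t0 → PySem.List.pyGetD c u 0 > 0) →
      (t0 - i).toNat < fuel →
      pvUp c i fuel = t0
  | 0, i, t0, h0, hit, hfree, hocc, hf => by omega
  | fuel + 1, i, t0, h0, hit, hfree, hocc, hf => by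
    simp only [pvUp]
    by_cases hg : PySem.List.pyGetD c i 0 > 0
    · rw [if_pos hg]
      have hne : i ≠ t0 := by
        intro e; rw [e, hfree] at hg; omega
      exact pvUp_go c fuel (i + 1) t0 (by omega) (by omega) hfree
        (fun u hu1 hu2 => hocc u (by omega) hu2) (by omega)
    · rw [if_neg hg]
      rcases lt_or_eq_of_le hit with h | h
      · exact absurd (hocc i le_rfl h) hg
      · exact h

theorem filter_ne_erase (s : Int) (P : Int → Bool) :
    ∀ (L : List Int), L.Nodup →
      L.filter (fun y => decide (y ≠ s) && P y) = (L.filter P).erase s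
  | [], _ => rfl
  | a :: L, hnd => by
    obtain ⟨hna, hndL⟩ := List.nodup_cons.mp hnd
    have hLrec : L.filter (fun y => decide (y ≠ s) && P y) = (L.filter P).erase s :=
      filter_ne_erase s P L hndL
    by_cases has : a = s
    · subst has
      have h1 : L.filter (fun y => decide (y ≠ a) && P y) = L.filter P :=
        List.filter_congr (fun y hy => by
          have hne : y ≠ a := fun e => hna (e ▸ hy)
          simp [hne])
      have hnf : a ∉ L.filter P := fun hmem => hna (List.mem_of_mem_filter hmem)
      by_cases hp : P a
      · rw [List.filter_cons_of_neg (by simp), List.filter_cons_of_pos hp,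
          List.erase_cons_head, h1]
      · rw [List.filter_cons_of_neg (by simp), List.filter_cons_of_neg hp,
          List.erase_of_not_mem hnf, h1]
    · by_cases hp : P a
      · rw [List.filter_cons_of_pos (by simp [has, hp]), List.filter_cons_of_pos hp,
          List.erase_cons_tail (by simpa using has), hLrec]
      · rw [List.filter_cons_of_neg (by simp [hp]), List.filter_cons_of_neg hp, hLrec]

theorem pvCanon_pySetD (c : List Int) (s : Int) (h0 : 0 ≤ s) (hlt : s < (c.length : Int)) :
    pvCanon (PySem.List.pySetD c s 1) = (pvCanon c).erase s := by
  unfold pvCanon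
  have hlen : (PySem.List.pySetD c s 1).length = c.length := by
    rw [PySem.List.pySetD_of_nonneg c 1 h0, List.length_set]
  rw [hlen]
  have hcongr : (PySem.List.pyRange 0 (c.length : Int) 1).filter
        (fun y => PySem.List.pyGetD (PySem.List.pySetD c s 1) y 0 = 0) =
      (PySem.List.pyRange 0 (c.length : Int) 1).filter
        (fun y => decide (y ≠ s) && decide (PySem.List.pyGetD c y 0 = 0)) := by
    apply List.filter_congr
    intro y hy
    have hyb := (PySem.List.mem_pyRange_one).mp hy
    have hget := PySem.List.pyGetD_eq_getElem (PySem.List.pySetD c s 1) 0 hyb.1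
      (show y < ((PySem.List.pySetD c s 1).length : Int) by rw [hlen]; exact hyb.2)
    have hsetnat : PySem.List.pySetD c s 1 = c.set s.toNat 1 :=
      PySem.List.pySetD_of_nonneg c 1 h0
    by_cases hys : y = s
    · subst hys
      rw [hget]
      simp only [hsetnat]
      rw [List.getElem_set_self (by rw [List.length_set]; omega)]
      simp
    · have htn : s.toNat ≠ y.toNat := by omega
      rw [hget]
      simp only [hsetnat]
      rw [List.getElem_set_ne htn]
      have hgety := PySem.List.pyGetD_eq_getElem c 0 hyb.1 hyb.2
      rw [← hgety]
      simp [hys]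
  rw [hcongr]
  exact filter_ne_erase s _ _ (PySem.List.nodup_pyRange_one 0 (c.length : Int))

theorem pvPop_eq_erase (l : List Int) (j : Nat) (hj : j < l.length) (hnd : l.Nodup) :
    pvPop l (j : Int) = l.erase l[j] := by
  unfold pvPop
  rw [PySem.List.pop?_natCast l j hj]
  simp only [Option.getD_some]
  exact (List.Nodup.erase_getElem hnd j hj).symm

theorem nodup_all_eq_length_le_one (L : List Int) (a : Int) (hnd : L.Nodup)
    (h : ∀ y ∈ L, y = a) : L.length ≤ 1 := by
  match L with
  | [] => simp
  | [x] => simp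
  | x :: y :: t =>
    exfalso
    obtain ⟨hx, hnd'⟩ := List.nodup_cons.mp hnd
    have h1 := h x (by simp)
    have h2 := h y (by simp)
    exact hx (by simp [h1, h2])

theorem take_slot (c : List Int) (s : Int) (h0 : 0 ≤ s) (hlt : s < (c.length : Int))
    (hfree : PySem.List.pyGetD c s 0 = 0) (hbin : ∀ v ∈ c, v = 0 ∨ v = 1) :
    pvCanon (PySem.List.pySetD c s 1) = (pvCanon c).erase s ∧
    (pvCanon (PySem.List.pySetD c s 1)).length + 1 = (pvCanon c).length ∧
    (PySem.List.pySetD c s 1).length = c.length ∧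
    (∀ v ∈ PySem.List.pySetD c s 1, v = 0 ∨ v = 1) := by
  have h1 := pvCanon_pySetD c s h0 hlt
  have hmem : s ∈ pvCanon c := (pvCanon_mem c s).mpr ⟨h0, hlt, hfree⟩
  refine ⟨h1, ?_, ?_, ?_⟩
  · rw [h1, List.length_erase_of_mem hmem]
    have : 0 < (pvCanon c).length := List.length_pos_of_mem hmem
    omega
  · rw [PySem.List.pySetD_of_nonneg c 1 h0, List.length_set]
  · intro v hv
    rw [PySem.List.pySetD_of_nonneg c 1 h0] at hv
    rcases List.mem_or_eq_of_mem_set hv with h | h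
    · exact hbin v h
    · right; exact h

theorem step_eq (c : List Int) (m num : Int)
    (h0 : 0 ≤ num) (hlt : num < (c.length : Int))
    (hbin : ∀ v ∈ c, v = 0 ∨ v = 1)
    (hfree2 : 2 ≤ (pvCanon c).length) :
    pvStepB (pvCanon c, m) num = (pvCanon (pvStepA (c, m) num).1, (pvStepA (c, m) num).2) ∧
    (pvCanon (pvStepA (c, m) num).1).length + 1 = (pvCanon c).length ∧
    (pvStepA (c, m) num).1.length = c.length ∧
    (∀ v ∈ (pvStepA (c, m) num).1, v = 0 ∨ v = 1) := by
  have hsortlt := pvCanon_sorted c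
  have hsle : (pvCanon c).Pairwise (· ≤ ·) := hsortlt.imp (fun h => le_of_lt h)
  have hnd := pvCanon_nodup c
  have hjeq : pvCountLE (pvCanon c) num 0 (PySem.List.len (pvCanon c)) ((pvCanon c).length + 1)
      = ((pvCanon c).countP (fun y => decide (y ≤ num)) : Int) :=
    pvCountLE_spec (pvCanon c) num hsle
  have hjlen : (pvCanon c).countP (fun y => decide (y ≤ num)) ≤ (pvCanon c).length :=
    List.countP_le_length
  have hnumnat : num.toNat < c.length := by omega
  have hvnum := PySem.List.pyGetD_eq_getElem c 0 h0 hlt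
  by_cases hfreenum : PySem.List.pyGetD c num 0 = 0
  · -- A takes its own (free) slot
    have hstepA : pvStepA (c, m) num = (PySem.List.pySetD c num 1, m) := by
      simp only [pvStepA]
      rw [if_pos hfreenum]
    have hmemnum : num ∈ pvCanon c := (pvCanon_mem c num).mpr ⟨h0, hlt, hfreenum⟩
    obtain ⟨hjpos, hjm1⟩ :=
      sorted_getElem_countP_pred (pvCanon c) num hsortlt num hmemnum le_rfl (fun y _ hy => hy)
    have hjm1lt : (pvCanon c).countP (fun y => decide (y ≤ num)) - 1 < (pvCanon c).length := by
      omega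
    have hgj1 : PySem.List.pyGetD (pvCanon c)
        (((pvCanon c).countP (fun y => decide (y ≤ num)) : Int) - 1) 0 = num := by
      have hb1 := PySem.List.pyGetD_eq_getElem (pvCanon c) 0
        (show (0:Int) ≤ ((pvCanon c).countP (fun y => decide (y ≤ num)) : Int) - 1 by omega)
        (show ((pvCanon c).countP (fun y => decide (y ≤ num)) : Int) - 1
            < ((pvCanon c).length : Int) by omega)
      simp only [show (((pvCanon c).countP (fun y => decide (y ≤ num)) : Int) - 1).toNat
          = (pvCanon c).countP (fun y => decide (y ≤ num)) - 1 from by omega] at hb1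
      exact hb1.trans (hjm1 hjm1lt)
    have hstepB : pvStepB (pvCanon c, m) num =
        (pvPop (pvCanon c) (((pvCanon c).countP (fun y => decide (y ≤ num)) : Int) - 1), m) := by
      simp only [pvStepB]
      rw [hjeq, if_pos ⟨by exact_mod_cast hjpos, hgj1⟩]
    have hpop : pvPop (pvCanon c) (((pvCanon c).countP (fun y => decide (y ≤ num)) : Int) - 1)
        = (pvCanon c).erase num := by
      rw [show (((pvCanon c).countP (fun y => decide (y ≤ num)) : Int) - 1)
          = (((pvCanon c).countP (fun y => decide (y ≤ num)) - 1 : Nat) : Int) from by omega]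
      rw [pvPop_eq_erase (pvCanon c) _ hjm1lt hnd, hjm1 hjm1lt]
    obtain ⟨hc1, hc2, hc3, hc4⟩ := take_slot c num h0 hlt hfreenum hbin
    rw [hstepA, hstepB, hpop]
    exact ⟨by rw [hc1], hc2, hc3, hc4⟩
  · -- slot num occupied
    have hoccnum : PySem.List.pyGetD c num 0 > 0 := by
      rcases hbin _ (List.getElem_mem hnumnat) with h | h
      · exact absurd (hvnum.trans h) hfreenum
      · rw [hvnum, h]; omega
    obtain ⟨s, hds, hs0, hsnum, hstop, hall⟩ :=
      pvDown_go c num (num.toNat + 1) 0 le_rfl h0 (by omega)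
        (by intro t h1 h2; exact absurd h2 (by omega))
    by_cases hspos : s > 0
    · -- nearest free slot strictly below
      have hslt : s < num := by
        rcases lt_or_eq_of_le (show s ≤ num by omega) with h | h
        · exact h
        · exact absurd ⟨hspos, h ▸ hoccnum⟩ hstop
      have hsrange : s < (c.length : Int) := by omega
      have hsnat : s.toNat < c.length := by omega
      have hvs := PySem.List.pyGetD_eq_getElem c 0 hs0 hsrange
      have hsfree : PySem.List.pyGetD c s 0 = 0 := by
        rcases hbin _ (List.getElem_mem hsnat) with h | h
        · exact hvs.trans h
        · exact absurd ⟨hspos, by rw [hvs, h]; omega⟩ hstop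
      have hmems : s ∈ pvCanon c := (pvCanon_mem c s).mpr ⟨hs0, hsrange, hsfree⟩
      have hmax : ∀ y ∈ pvCanon c, y ≤ num → y ≤ s := by
        intro y hy hyn
        by_contra hcon
        have hyfree := ((pvCanon_mem c y).mp hy).2.2
        have := hall y (by omega) hyn
        omega
      obtain ⟨hjpos, hjm1⟩ :=
        sorted_getElem_countP_pred (pvCanon c) num hsortlt s hmems (by omega) hmax
      have hjm1lt : (pvCanon c).countP (fun y => decide (y ≤ num)) - 1 < (pvCanon c).length := by
        omega
      have hgj1 : PySem.List.pyGetD (pvCanon c)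
          (((pvCanon c).countP (fun y => decide (y ≤ num)) : Int) - 1) 0 = s := by
        have hb1 := PySem.List.pyGetD_eq_getElem (pvCanon c) 0
          (show (0:Int) ≤ ((pvCanon c).countP (fun y => decide (y ≤ num)) : Int) - 1 by omega)
          (show ((pvCanon c).countP (fun y => decide (y ≤ num)) : Int) - 1
              < ((pvCanon c).length : Int) by omega)
        simp only [show (((pvCanon c).countP (fun y => decide (y ≤ num)) : Int) - 1).toNat
            = (pvCanon c).countP (fun y => decide (y ≤ num)) - 1 from by omega] at hb1
        exact hb1.trans (hjm1 hjm1lt)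
      have hstepA : pvStepA (c, m) num = (PySem.List.pySetD c s 1, m + (num - s)) := by
        simp only [pvStepA]
        rw [if_neg hfreenum, hds, if_pos (show num - (num - s) > 0 by omega),
          show num - (num - s) = s from by omega]
      have hstepB : pvStepB (pvCanon c, m) num =
          (pvPop (pvCanon c) (((pvCanon c).countP (fun y => decide (y ≤ num)) : Int) - 1),
            m + (num - s)) := by
        simp only [pvStepB]
        rw [hjeq, if_neg (by rintro ⟨-, he⟩; rw [hgj1] at he; omega),
          if_pos ⟨by exact_mod_cast hjpos, by rw [hgj1]; exact hspos⟩, hgj1]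
      have hpop : pvPop (pvCanon c) (((pvCanon c).countP (fun y => decide (y ≤ num)) : Int) - 1)
          = (pvCanon c).erase s := by
        rw [show (((pvCanon c).countP (fun y => decide (y ≤ num)) : Int) - 1)
            = (((pvCanon c).countP (fun y => decide (y ≤ num)) - 1 : Nat) : Int) from by omega]
        rw [pvPop_eq_erase (pvCanon c) _ hjm1lt hnd, hjm1 hjm1lt]
      obtain ⟨hc1, hc2, hc3, hc4⟩ := take_slot c s hs0 hsrange hsfree hbin
      rw [hstepA, hstepB, hpop]
      exact ⟨by rw [hc1], hc2, hc3, hc4⟩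
    · -- slots 1..num all occupied: nearest free slot above
      have hs00 : s = 0 := by omega
      subst hs00
      have helem0 : ∀ y ∈ pvCanon c, y ≤ num → y = 0 := by
        intro y hy hyn
        have hm := (pvCanon_mem c y).mp hy
        by_contra hcon
        have := hall y (by omega) hyn
        omega
      have hjle1 : (pvCanon c).countP (fun y => decide (y ≤ num)) ≤ 1 := by
        rw [List.countP_eq_length_filter]
        apply nodup_all_eq_length_le_one _ 0 (hnd.filter _)
        intro y hy
        exact helem0 y (List.mem_of_mem_filter hy) (by simpa using List.of_mem_filter hy)
      have hjlt : (pvCanon c).countP (fun y => decide (y ≤ num)) < (pvCanon c).length := by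
        omega
      obtain ⟨hgt, hmin⟩ := sorted_getElem_countP (pvCanon c) num hsortlt hjlt
      have hmt0 := (pvCanon_mem c ((pvCanon c)[(pvCanon c).countP (fun y => decide (y ≤ num))]'hjlt)).mp
        (List.getElem_mem hjlt)
      have hupeq : pvUp c (num + 1) (c.length + 1)
          = (pvCanon c)[(pvCanon c).countP (fun y => decide (y ≤ num))]'hjlt := by
        apply pvUp_go c (c.length + 1) (num + 1) _ (by omega) (by omega) hmt0.2.2
        · intro u hu1 hu2
          have hurange : u < (c.length : Int) := by have := hmt0.2.1; omega
          have hu0 : 0 ≤ u := by omega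
          have hunat : u.toNat < c.length := by omega
          have hvu := PySem.List.pyGetD_eq_getElem c 0 hu0 hurange
          rcases hbin _ (List.getElem_mem hunat) with h | h
          · exfalso
            have humem : u ∈ pvCanon c := (pvCanon_mem c u).mpr ⟨hu0, hurange, hvu.trans h⟩
            have := hmin u humem (by omega)
            omega
          · rw [hvu, h]; omega
        · have := hmt0.2.1; omega
      have hstepA : pvStepA (c, m) num =
          (PySem.List.pySetD c ((pvCanon c)[(pvCanon c).countP (fun y => decide (y ≤ num))]'hjlt) 1,
            m + ((pvCanon c)[(pvCanon c).countP (fun y => decide (y ≤ num))]'hjlt - num)) := by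
        simp only [pvStepA]
        rw [if_neg hfreenum, hds, if_neg (show ¬ num - (num - 0) > 0 by omega), hupeq]
      have hzjm1 : ∀ (hjp : 0 < (pvCanon c).countP (fun y => decide (y ≤ num)))
          (h : (pvCanon c).countP (fun y => decide (y ≤ num)) - 1 < (pvCanon c).length),
          (pvCanon c)[(pvCanon c).countP (fun y => decide (y ≤ num)) - 1] = 0 := by
        intro hjp h
        exact helem0 _ (List.getElem_mem h)
          ((sorted_boundary num (pvCanon c) hsle _ h).mp (by omega))
      have hcond : ∀ (hjp : ((pvCanon c).countP (fun y => decide (y ≤ num)) : Int) > 0),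
          PySem.List.pyGetD (pvCanon c)
            (((pvCanon c).countP (fun y => decide (y ≤ num)) : Int) - 1) 0 = 0 := by
        intro hjp
        have hjm1lt : (pvCanon c).countP (fun y => decide (y ≤ num)) - 1 < (pvCanon c).length := by
          omega
        have hb1 := PySem.List.pyGetD_eq_getElem (pvCanon c) 0
          (show (0:Int) ≤ ((pvCanon c).countP (fun y => decide (y ≤ num)) : Int) - 1 by omega)
          (show ((pvCanon c).countP (fun y => decide (y ≤ num)) : Int) - 1
              < ((pvCanon c).length : Int) by omega)
        simp only [show (((pvCanon c).countP (fun y => decide (y ≤ num)) : Int) - 1).toNat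
            = (pvCanon c).countP (fun y => decide (y ≤ num)) - 1 from by omega] at hb1
        exact hb1.trans (hzjm1 (by exact_mod_cast hjp) hjm1lt)
      have hcond1 : ¬(((pvCanon c).countP (fun y => decide (y ≤ num)) : Int) > 0 ∧
          PySem.List.pyGetD (pvCanon c)
            (((pvCanon c).countP (fun y => decide (y ≤ num)) : Int) - 1) 0 = num) := by
        rintro ⟨hjp, he⟩
        rw [hcond hjp] at he
        -- then num = 0; but slot 0 is free (it is in pvCanon c), contradicting hfreenum
        have hjp' : 0 < (pvCanon c).countP (fun y => decide (y ≤ num)) := by exact_mod_cast hjp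
        have hjm1lt : (pvCanon c).countP (fun y => decide (y ≤ num)) - 1 < (pvCanon c).length := by
          omega
        have hmem0 : (0:Int) ∈ pvCanon c := (hzjm1 hjp' hjm1lt) ▸ List.getElem_mem hjm1lt
        have hfree0 := ((pvCanon_mem c 0).mp hmem0).2.2
        subst he
        exact hfreenum hfree0
      have hcond2 : ¬(((pvCanon c).countP (fun y => decide (y ≤ num)) : Int) > 0 ∧
          PySem.List.pyGetD (pvCanon c)
            (((pvCanon c).countP (fun y => decide (y ≤ num)) : Int) - 1) 0 > 0) := by
        rintro ⟨hjp, he⟩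
        rw [hcond hjp] at he
        omega
      have hgj : PySem.List.pyGetD (pvCanon c)
          (((pvCanon c).countP (fun y => decide (y ≤ num)) : Int)) 0
          = (pvCanon c)[(pvCanon c).countP (fun y => decide (y ≤ num))]'hjlt := by
        have hb1 := PySem.List.pyGetD_eq_getElem (pvCanon c) 0
          (show (0:Int) ≤ ((pvCanon c).countP (fun y => decide (y ≤ num)) : Int) by omega)
          (show (((pvCanon c).countP (fun y => decide (y ≤ num)) : Int))
              < ((pvCanon c).length : Int) by omega)
        simp only [Int.toNat_natCast] at hb1
        exact hb1
      have hstepB : pvStepB (pvCanon c, m) num =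
          (pvPop (pvCanon c) (((pvCanon c).countP (fun y => decide (y ≤ num)) : Int)),
            m + ((pvCanon c)[(pvCanon c).countP (fun y => decide (y ≤ num))]'hjlt - num)) := by
        simp only [pvStepB]
        rw [hjeq, if_neg hcond1, if_neg hcond2, hgj]
      have hpop : pvPop (pvCanon c) (((pvCanon c).countP (fun y => decide (y ≤ num)) : Int))
          = (pvCanon c).erase ((pvCanon c)[(pvCanon c).countP (fun y => decide (y ≤ num))]'hjlt) :=
        pvPop_eq_erase (pvCanon c) _ hjlt hnd
      obtain ⟨hc1, hc2, hc3, hc4⟩ :=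
        take_slot c ((pvCanon c)[(pvCanon c).countP (fun y => decide (y ≤ num))]'hjlt)
          hmt0.1 hmt0.2.1 hmt0.2.2 hbin
      rw [hstepA, hstepB, hpop]
      exact ⟨by rw [hc1], hc2, hc3, hc4⟩

theorem fold_eq : ∀ (r : List Int) (c : List Int) (m : Int),
    (∀ x ∈ r, 0 ≤ x ∧ x < (c.length : Int)) →
    (∀ v ∈ c, v = 0 ∨ v = 1) →
    (pvCanon c).length = r.length + 1 →
    r.foldl pvStepB (pvCanon c, m) =
      (pvCanon (r.foldl pvStepA (c, m)).1, (r.foldl pvStepA (c, m)).2)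
  | [], c, m, _, _, _ => rfl
  | x :: r, c, m, hx, hbin, hlen => by
    simp only [List.foldl_cons]
    obtain ⟨hEq, hL, hLen, hBin⟩ :=
      step_eq c m x (hx x List.mem_cons_self).1 (hx x List.mem_cons_self).2
        hbin (by simp only [List.length_cons] at hlen; omega)
    rw [hEq]
    have hih := fold_eq r (pvStepA (c, m) x).1 (pvStepA (c, m) x).2
      (by intro y hy; rw [hLen]; exact hx y (List.mem_cons_of_mem x hy))
      hBin
      (by simp only [List.length_cons] at hlen; omega)
    rw [Prod.mk.eta] at hih
    exact hih

theorem pvCanon_replicate (n : Nat) :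
    pvCanon (List.replicate (n + 1) (0 : Int)) = PySem.List.pyRange 0 ((n : Int) + 1) 1 := by
  unfold pvCanon
  rw [List.length_replicate]
  rw [show (((n + 1 : Nat)) : Int) = (n : Int) + 1 from by push_cast; ring]
  apply List.filter_eq_self.mpr
  intro s hs
  have hsb := (PySem.List.mem_pyRange_one).mp hs
  have hlen2 : s < ((List.replicate (n + 1) (0:Int)).length : Int) := by
    rw [List.length_replicate]; omega
  have hget := PySem.List.pyGetD_eq_getElem (List.replicate (n + 1) (0:Int)) 0 hsb.1 hlen2
  rw [hget, List.getElem_replicate]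
  simp

-- ===== VERDICT (by name: the statement is the Claim_ definition above) =====
theorem solution_spec : Claim_equal_solution := by
  intro A hdom hpre
  unfold Spec_solution
  obtain ⟨hne, hcase⟩ := hpre
  unfold solution solution_alt
  simp only [PySem.List.len_eq]
  by_cases h200 : (A.length : Int) > 200000
  · rw [if_pos h200, if_pos h200]
  · rw [if_neg h200, if_neg h200]
    obtain ⟨mx, hmx⟩ : ∃ mx, PySem.List.max? A (fun x => x) = some mx := by
      cases hq : PySem.List.max? A (fun x => x) with
      | none => exact absurd ((PySem.List.max?_eq_none_iff A (fun x => x)).mp hq) hne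
      | some mx => exact ⟨mx, rfl⟩
    rw [hmx]
    simp only [Option.getD_some]
    by_cases hmxn : mx > (A.length : Int)
    · rw [if_pos hmxn, if_pos hmxn]
    · rw [if_neg hmxn, if_neg hmxn]
      have hpos : ∀ x ∈ A, 0 ≤ x := by
        rcases hcase with h | h | h
        · exact absurd h h200
        · exfalso
          obtain ⟨x, hx, hgt⟩ := h
          have := PySem.List.max?_isMax hmx x hx
          omega
        · exact h
      have hfold := fold_eq A (List.replicate (A.length + 1) (0:Int)) 0
        (by
          intro x hx
          have h1 := hpos x hx
          have h2 := PySem.List.max?_isMax hmx x hx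
          rw [List.length_replicate]
          refine ⟨h1, ?_⟩
          push_cast
          omega)
        (by intro v hv; left; exact List.eq_of_mem_replicate hv)
        (by rw [pvCanon_replicate, PySem.List.length_pyRange_one]; omega)
      rw [← pvCanon_replicate A.length, hfold]
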